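-- pv_equiv track=rewrite | github.com/zheedong/BaekJoon | python/15788.py | check_rule1
-- ===== SOURCE A (Python) =====
-- def check_rule1(puzzle, expected_sum):
--     sum_except_m = None
--     for row in puzzle:
--         if 0 in row:
--             sum_except_m = sum(row)
--         else:
--             if expected_sum != sum(row):
--                 return -1
--     else:
--         return expected_sum - sum_except_m
-- ===== SOURCE B (Python) =====
-- def check_rule1(puzzle, expected_sum):
--     missing = None
--     for row in puzzle:
--         if 0 in row:
--             missing = sum(row)
--     if any(expected_sum != sum(row) for row in puzzle if 0 not in row):
--         return -1
--     return expected_sum - missing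
-- ===== Notes on version B (the rewrite author's own statement) =====
-- stated objective: simpler
-- what changed: Replaces A's single interleaved loop with early return by two independent passes: one recording the last zero-row's sum, one checking all non-zero rows via any(); valid because the -1 result is order-independent.
import Mathlib
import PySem

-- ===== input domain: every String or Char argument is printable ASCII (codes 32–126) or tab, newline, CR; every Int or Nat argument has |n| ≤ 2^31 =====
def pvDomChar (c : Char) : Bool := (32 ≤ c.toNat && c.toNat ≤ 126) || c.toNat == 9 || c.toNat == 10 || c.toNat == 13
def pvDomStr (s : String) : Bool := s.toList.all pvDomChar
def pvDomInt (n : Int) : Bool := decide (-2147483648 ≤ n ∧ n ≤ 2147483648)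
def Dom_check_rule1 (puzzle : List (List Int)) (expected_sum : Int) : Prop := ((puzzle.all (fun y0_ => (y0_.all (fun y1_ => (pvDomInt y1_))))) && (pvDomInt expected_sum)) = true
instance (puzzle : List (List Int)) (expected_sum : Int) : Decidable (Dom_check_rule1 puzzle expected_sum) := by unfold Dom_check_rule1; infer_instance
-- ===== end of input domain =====

-- B replaces A's single interleaved loop (early return -1) by two independent passes; equivalence proved on inputs where A returns (some row contains 0, or some zero-less row mismatches).

-- ===== PORT A =====
-- Loop of A: state sum_except_m : Option Int (None until a zero-row is seen).
-- Where Python would raise TypeError (state still none at the end) the port returns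
-- expected_sum - 0; those inputs are excluded by Pre_check_rule1.
def check_rule1_go (expected_sum : Int) : List (List Int) → Option Int → Int
  | [], sum_except_m => expected_sum - sum_except_m.getD 0
  | row :: rest, sum_except_m =>
    if (0 : Int) ∈ row then
      check_rule1_go expected_sum rest (some row.sum)
    else
      if expected_sum ≠ row.sum then -1
      else check_rule1_go expected_sum rest sum_except_m

def check_rule1 (puzzle : List (List Int)) (expected_sum : Int) : Int :=
  check_rule1_go expected_sum puzzle none

-- ===== PORT B =====
-- Two passes: foldl records the last zero-row's sum; any detects a bad zero-less row.
def check_rule1_alt (puzzle : List (List Int)) (expected_sum : Int) : Int :=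
  let missing : Option Int :=
    puzzle.foldl (fun m row => if (0 : Int) ∈ row then some row.sum else m) none
  if puzzle.any (fun row => decide ((0 : Int) ∉ row) && decide (expected_sum ≠ row.sum)) then -1
  else expected_sum - missing.getD 0

-- ===== PRECONDITION & SPEC =====
-- Pre_ excludes exactly the inputs where Python A (and B alike) raises TypeError:
-- no row contains 0 and every row sums to expected_sum (including the empty puzzle).
def Pre_check_rule1 (puzzle : List (List Int)) (expected_sum : Int) : Prop :=
  ∃ row ∈ puzzle, (0 : Int) ∈ row ∨ row.sum ≠ expected_sum
instance (puzzle : List (List Int)) (expected_sum : Int) : Decidable (Pre_check_rule1 puzzle expected_sum) := by unfold Pre_check_rule1; infer_instance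
def pvWitness_check_rule1 : List (List Int) × Int := ([[0, 2], [1, 2]], 3)

def Spec_check_rule1 (puzzle : List (List Int)) (expected_sum : Int) (out : Int) : Prop := out = check_rule1_alt puzzle expected_sum
instance (puzzle : List (List Int)) (expected_sum : Int) (out : Int) : Decidable (Spec_check_rule1 puzzle expected_sum out) := by unfold Spec_check_rule1; infer_instance

-- ===== CLAIM (what is proved, stated in full; the proofs are below) =====
def Claim_equal_check_rule1 : Prop := ∀ (puzzle : List (List Int)) (expected_sum : Int), Dom_check_rule1 puzzle expected_sum → Pre_check_rule1 puzzle expected_sum → Spec_check_rule1 puzzle expected_sum (check_rule1 puzzle expected_sum)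

-- ===== LEMMAS AND PROOFS =====
-- The loop of A, started in any state s, equals B's two-pass combination started in s.
theorem check_rule1_go_eq (expected_sum : Int) (puzzle : List (List Int)) (s : Option Int) :
    check_rule1_go expected_sum puzzle s =
      (if puzzle.any (fun row => decide ((0 : Int) ∉ row) && decide (expected_sum ≠ row.sum)) then -1
       else expected_sum -
         (puzzle.foldl (fun m row => if (0 : Int) ∈ row then some row.sum else m) s).getD 0) := by
  induction puzzle generalizing s with
  | nil => simp [check_rule1_go]
  | cons row rest ih =>
    by_cases hz : (0 : Int) ∈ row
    · simp [check_rule1_go, hz, ih]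
    · by_cases hs : expected_sum = row.sum
      · subst hs; simp [check_rule1_go, hz, ih]
      · simp [check_rule1_go, hz, hs]

-- ===== VERDICT (by name: the statement is the Claim_ definition above) =====
theorem check_rule1_spec : Claim_equal_check_rule1 := by
  intro puzzle expected_sum _ _
  unfold Spec_check_rule1 check_rule1 check_rule1_alt
  exact check_rule1_go_eq expected_sum puzzle none
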